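-- pv_equiv track=rewrite | github.com/iarcanar99/MBB_Dalamud | python-app/simplified_hotkey_ui.py | is_valid_hotkey
-- ===== SOURCE A (Python) =====
-- def is_valid_hotkey(hotkey):
--     hotkey = hotkey.lower()
--     valid_keys = set("abcdefghijklmnopqrstuvwxyz0123456789")
--     valid_functions = set(
--         ["f1", "f2", "f3", "f4", "f5", "f6", "f7", "f8", "f9", "f10", "f11", "f12"]
--     )
--     valid_modifiers = set(["ctrl", "alt", "shift"])
--
--     parts = hotkey.split("+")
--
--     if len(parts) == 1:
--         return parts[0] in valid_keys or parts[0] in valid_functions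
--
--     if len(parts) > 1:
--         modifiers = parts[:-1]
--         key = parts[-1]
--         return all(mod in valid_modifiers for mod in modifiers) and (
--             key in valid_keys or key in valid_functions
--         )
--
--     return False
-- ===== SOURCE B (Python) =====
-- def is_valid_hotkey(hotkey):
--     s = hotkey.lower()
--     # peel modifier prefixes one at a time; no split, no part list
--     while True:
--         if s.startswith("ctrl+"):
--             s = s[5:]
--         elif s.startswith("alt+"):
--             s = s[4:]
--         elif s.startswith("shift+"):
--             s = s[6:]
--         else:
--             break
--     if len(s) == 1:
--         return s in "abcdefghijklmnopqrstuvwxyz0123456789"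
--     return s in ("f1", "f2", "f3", "f4", "f5", "f6", "f7", "f8", "f9", "f10", "f11", "f12")
-- ===== Notes on version B (the rewrite author's own statement) =====
-- stated objective: alternative
-- what changed: Instead of splitting on '+' and testing every part against modifier/key sets, B repeatedly peels a literal 'ctrl+'/'alt+'/'shift+' prefix off the lowercased string and then checks that the remainder is a single alphanumeric character or an F-key f1..f12; no part list is ever built.
import Mathlib
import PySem

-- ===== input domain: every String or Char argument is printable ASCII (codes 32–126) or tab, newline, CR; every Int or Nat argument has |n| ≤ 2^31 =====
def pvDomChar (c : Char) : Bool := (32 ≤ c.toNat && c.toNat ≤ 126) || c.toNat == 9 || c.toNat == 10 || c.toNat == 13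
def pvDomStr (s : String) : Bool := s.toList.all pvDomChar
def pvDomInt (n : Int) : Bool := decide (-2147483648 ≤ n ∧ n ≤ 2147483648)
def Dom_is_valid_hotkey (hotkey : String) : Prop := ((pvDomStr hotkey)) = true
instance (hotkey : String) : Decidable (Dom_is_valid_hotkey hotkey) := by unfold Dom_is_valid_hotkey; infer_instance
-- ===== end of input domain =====

-- B replaces A's split-into-parts + set-membership check by repeatedly peeling a
-- "ctrl+"/"alt+"/"shift+" prefix off the front and validating the remaining key (objective: alternative).

-- ===== PORT A =====
def is_valid_hotkey (hotkey : String) : Bool :=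
  let h := PySem.Chars.lower hotkey.toList
  let validKeys : PySem.Set (List Char) :=
    PySem.Set.ofList ("abcdefghijklmnopqrstuvwxyz0123456789".toList.map (fun c => [c]))
  let validFunctions : PySem.Set (List Char) :=
    PySem.Set.ofList ["f1".toList, "f2".toList, "f3".toList, "f4".toList, "f5".toList,
      "f6".toList, "f7".toList, "f8".toList, "f9".toList, "f10".toList, "f11".toList,
      "f12".toList]
  let validModifiers : PySem.Set (List Char) :=
    PySem.Set.ofList ["ctrl".toList, "alt".toList, "shift".toList]
  let parts := PySem.Chars.splitOn h ['+']
  if parts.length == 1 then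
    decide (PySem.List.pyGetD parts 0 [] ∈ validKeys) ||
      decide (PySem.List.pyGetD parts 0 [] ∈ validFunctions)
  else if parts.length > 1 then
    (PySem.List.slice parts none (some (-1))).all
        (fun m => decide (m ∈ validModifiers)) &&
      (decide (PySem.List.pyGetD parts (-1) [] ∈ validKeys) ||
        decide (PySem.List.pyGetD parts (-1) [] ∈ validFunctions))
  else false

-- ===== PORT B =====
-- B's while-loop peeling "ctrl+"/"alt+"/"shift+" prefixes; terminates because the string shrinks.
def altStrip (s : List Char) : List Char :=
  if h1 : PySem.Chars.startswith s ['c','t','r','l','+'] = true then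
    altStrip (s.drop 5)
  else if h2 : PySem.Chars.startswith s ['a','l','t','+'] = true then
    altStrip (s.drop 4)
  else if h3 : PySem.Chars.startswith s ['s','h','i','f','t','+'] = true then
    altStrip (s.drop 6)
  else s
termination_by s.length
decreasing_by
  · have := (PySem.Chars.startswith_iff _ _).mp h1
    have := this.length_le; simp at this ⊢; omega
  · have := (PySem.Chars.startswith_iff _ _).mp h2
    have := this.length_le; simp at this ⊢; omega
  · have := (PySem.Chars.startswith_iff _ _).mp h3
    have := this.length_le; simp at this ⊢; omega

def is_valid_hotkey_alt (hotkey : String) : Bool :=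
  let s := altStrip (PySem.Chars.lower hotkey.toList)
  if s.length == 1 then
    PySem.Chars.isIn s "abcdefghijklmnopqrstuvwxyz0123456789".toList
  else
    ["f1".toList, "f2".toList, "f3".toList, "f4".toList, "f5".toList, "f6".toList,
      "f7".toList, "f8".toList, "f9".toList, "f10".toList, "f11".toList,
      "f12".toList].contains s

-- ===== PRECONDITION & SPEC =====
def Spec_is_valid_hotkey (hotkey : String) (out : Bool) : Prop := out = is_valid_hotkey_alt hotkey
instance (hotkey : String) (out : Bool) : Decidable (Spec_is_valid_hotkey hotkey out) := by unfold Spec_is_valid_hotkey; infer_instance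

def Claim_equal_is_valid_hotkey : Prop := ∀ (hotkey : String), Dom_is_valid_hotkey hotkey → Spec_is_valid_hotkey hotkey (is_valid_hotkey hotkey)

-- proof-side helpers
def pparts (pre : List Char) : List Char → List (List Char)
  | [] => [pre]
  | c :: rest => if c = '+' then pre :: pparts [] rest else pparts (pre ++ [c]) rest

def pvKeySet : PySem.Set (List Char) :=
  PySem.Set.ofList ("abcdefghijklmnopqrstuvwxyz0123456789".toList.map (fun c => [c]))
def pvFuncList : List (List Char) :=
  [['f','1'], ['f','2'], ['f','3'], ['f','4'], ['f','5'], ['f','6'],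
    ['f','7'], ['f','8'], ['f','9'], ['f','1','0'], ['f','1','1'], ['f','1','2']]
def pvModSet : PySem.Set (List Char) := PySem.Set.ofList [['c','t','r','l'], ['a','l','t'], ['s','h','i','f','t']]
def pvKeycheck (k : List Char) : Bool :=
  decide (k ∈ pvKeySet) || decide (k ∈ PySem.Set.ofList pvFuncList)
def pvAPP (parts : List (List Char)) : Bool :=
  if parts.length == 1 then pvKeycheck (PySem.List.pyGetD parts 0 [])
  else if parts.length > 1 then
    (PySem.List.slice parts none (some (-1))).all (fun m => decide (m ∈ pvModSet)) &&
      pvKeycheck (PySem.List.pyGetD parts (-1) [])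
  else false
def pvBFin (t : List Char) : Bool :=
  if t.length == 1 then PySem.Chars.isIn t "abcdefghijklmnopqrstuvwxyz0123456789".toList
  else pvFuncList.contains t

theorem go_spec : ∀ (l : List Char) (fuel : Nat) (cur : List Char) (acc : List (List Char)),
    l.length < fuel →
    PySem.Chars.splitOn.go ['+'] fuel l cur acc = acc.reverse ++ pparts cur.reverse l := by
  intro l
  induction l with
  | nil =>
    intro fuel cur acc h
    match fuel, h with
    | fuel+1, _ => simp [PySem.Chars.splitOn.go, pparts]
  | cons c rest ih =>
    intro fuel cur acc h
    match fuel, h with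
    | fuel+1, h =>
      rw [PySem.Chars.splitOn.go]
      by_cases hc : c = '+'
      · subst hc
        simp only [List.isPrefixOf, BEq.rfl, Bool.and_self, if_pos]
        rw [show (List.drop ['+'].length ('+' :: rest)) = rest by simp]
        rw [ih fuel [] (cur.reverse :: acc) (by simp at h; omega)]
        simp [pparts]
      · have hpf : (['+'].isPrefixOf (c :: rest)) = false := by
          simp [List.isPrefixOf]; exact fun hh => (hc (by simpa using hh.symm)).elim
        rw [hpf]
        simp only [Bool.false_eq_true, if_false]
        rw [ih fuel (c :: cur) acc (by simp at h; omega)]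
        simp [pparts, hc]

theorem splitOn_eq (s : List Char) : PySem.Chars.splitOn s ['+'] = pparts [] s := by
  rw [PySem.Chars.splitOn, go_spec s (s.length + 1) [] [] (by omega)]; simp

theorem pparts_ne_nil : ∀ (l pre : List Char), pparts pre l ≠ [] := by
  intro l
  induction l with
  | nil => intro pre; simp [pparts]
  | cons c rest ih =>
    intro pre
    by_cases hc : c = '+'
    · simp [pparts, hc]
    · simp only [pparts, if_neg hc]; exact ih _

theorem pparts_no_plus : ∀ (l pre : List Char), '+' ∉ l → pparts pre l = [pre ++ l] := by
  intro l
  induction l with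
  | nil => intro pre _; simp [pparts]
  | cons c rest ih =>
    intro pre h
    simp at h
    simp [pparts, Ne.symm h.1, ih (pre ++ [c]) h.2]

theorem pparts_plus : ∀ (p rest pre : List Char), '+' ∉ p →
    pparts pre (p ++ '+' :: rest) = (pre ++ p) :: pparts [] rest := by
  intro p
  induction p with
  | nil => intro rest pre _; simp [pparts]
  | cons c cs ih =>
    intro rest pre h
    simp at h
    simp [pparts, Ne.symm h.1, ih rest (pre ++ [c]) h.2]

theorem A_eq (hotkey : String) :
    is_valid_hotkey hotkey = pvAPP (pparts [] (PySem.Chars.lower hotkey.toList)) := by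
  rw [show is_valid_hotkey hotkey =
        pvAPP (PySem.Chars.splitOn (PySem.Chars.lower hotkey.toList) ['+']) from rfl,
      splitOn_eq]

theorem B_eq (hotkey : String) :
    is_valid_hotkey_alt hotkey = pvBFin (altStrip (PySem.Chars.lower hotkey.toList)) := rfl

-- one peel step on the A side: a leading modifier part is swallowed
theorem APP_step (p rest : List Char) (hp : '+' ∉ p) (hmod : p ∈ pvModSet) :
    pvAPP (pparts [] (p ++ '+' :: rest)) = pvAPP (pparts [] rest) := by
  rw [pparts_plus p rest [] hp]
  simp only [List.nil_append]
  rcases hq : pparts [] rest with _ | ⟨q, qs⟩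
  · exact absurd hq (pparts_ne_nil rest [])
  · rcases qs with _ | ⟨q2, qs2⟩
    · simp [pvAPP, PySem.List.slice_to_neg_one, hmod, PySem.List.pyGetD_neg_one]
    · simp [pvAPP, PySem.List.slice_to_neg_one, hmod, PySem.List.pyGetD_neg_one,
        List.dropLast_cons_of_ne_nil, List.getLast_cons]

theorem BFin_false_of_plus (s : List Char) (h : '+' ∈ s) : pvBFin s = false := by
  rcases s with _ | ⟨c, cs⟩
  · simp at h
  · rcases cs with _ | ⟨c2, cs2⟩
    · simp at h; subst h; decide
    · simp only [pvBFin, List.length_cons]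
      rw [if_neg (by simp)]
      by_cases hc : pvFuncList.contains (c :: c2 :: cs2)
      · have hm : (c :: c2 :: cs2) ∈ pvFuncList := by simpa using hc
        exfalso; fin_cases hm <;> simp_all
      · simpa using hc

theorem main_core : ∀ (n : Nat) (s : List Char), s.length ≤ n →
    pvAPP (pparts [] s) = pvBFin (altStrip s) := by
  intro n
  induction n with
  | zero =>
    intro s hs
    rcases s with _ | _
    · rw [altStrip]; simp [pparts, pvAPP, pvBFin, pvKeycheck]
      decide
    · simp at hs
  | succ n ih =>
    intro s hs
    rw [altStrip]
    by_cases h1 : PySem.Chars.startswith s ['c','t','r','l','+'] = true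
    · obtain ⟨rest, hrest⟩ := (PySem.Chars.startswith_iff _ _).mp h1
      subst hrest
      rw [dif_pos h1]
      rw [show (List.drop 5 (['c','t','r','l','+'] ++ rest)) = rest by simp]
      rw [show (['c','t','r','l','+'] ++ rest) = (['c','t','r','l'] ++ '+' :: rest) by simp]
      rw [APP_step _ rest (by decide) (by decide)]
      exact ih rest (by simp at hs; omega)
    · rw [dif_neg h1]
      by_cases h2 : PySem.Chars.startswith s ['a','l','t','+'] = true
      · obtain ⟨rest, hrest⟩ := (PySem.Chars.startswith_iff _ _).mp h2
        subst hrest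
        rw [dif_pos h2]
        rw [show (List.drop 4 (['a','l','t','+'] ++ rest)) = rest by simp]
        rw [show (['a','l','t','+'] ++ rest) = (['a','l','t'] ++ '+' :: rest) by simp]
        rw [APP_step _ rest (by decide) (by decide)]
        exact ih rest (by simp at hs; omega)
      · rw [dif_neg h2]
        by_cases h3 : PySem.Chars.startswith s ['s','h','i','f','t','+'] = true
        · obtain ⟨rest, hrest⟩ := (PySem.Chars.startswith_iff _ _).mp h3
          subst hrest
          rw [dif_pos h3]
          rw [show (List.drop 6 (['s','h','i','f','t','+'] ++ rest)) = rest by simp]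
          rw [show (['s','h','i','f','t','+'] ++ rest) = (['s','h','i','f','t'] ++ '+' :: rest) by simp]
          rw [APP_step _ rest (by decide) (by decide)]
          exact ih rest (by simp at hs; omega)
        · rw [dif_neg h3]
          by_cases hp : '+' ∈ s
          · -- A is false: first part is not a modifier; B is false: '+' survives
            rw [BFin_false_of_plus s hp]
            obtain ⟨p, hpdef⟩ : ∃ p, s.takeWhile (· ≠ '+') = p := ⟨_, rfl⟩
            have hsplit : p ++ s.dropWhile (· ≠ '+') = s := by
              rw [← hpdef]; exact List.takeWhile_append_dropWhile
            have hdnn : s.dropWhile (· ≠ '+') ≠ [] := by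
              intro he
              have htw : s.takeWhile (· ≠ '+') = s := by
                have := List.takeWhile_append_dropWhile (p := (· ≠ '+')) (l := s)
                rw [he] at this; simpa using this
              have := List.mem_takeWhile_imp (l := s) (p := (· ≠ '+')) (by rw [htw]; exact hp)
              simp at this
            rcases hd : s.dropWhile (· ≠ '+') with _ | ⟨x, xs⟩
            · exact absurd hd hdnn
            · have hx : x = '+' := by
                have := List.head?_dropWhile_not (p := (· ≠ '+')) (l := s)
                rw [hd] at this; simpa using this
              subst hx
              have hnp : '+' ∉ p := by
                intro hmem
                have := List.mem_takeWhile_imp (l := s) (p := (· ≠ '+')) (hpdef ▸ hmem)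
                simp at this
              have hs_eq : s = p ++ '+' :: xs := by rw [← hsplit, hd]
              rw [hs_eq, pparts_plus p xs [] hnp]
              have hpnotmod : ¬ (p ∈ pvModSet) := by
                intro hmem
                rw [pvModSet, PySem.Set.mem_ofList] at hmem
                simp at hmem
                rcases hmem with rfl | rfl | rfl
                · exact h1 ((PySem.Chars.startswith_iff _ _).mpr ⟨xs, by rw [hs_eq]; rfl⟩)
                · exact h2 ((PySem.Chars.startswith_iff _ _).mpr ⟨xs, by rw [hs_eq]; rfl⟩)
                · exact h3 ((PySem.Chars.startswith_iff _ _).mpr ⟨xs, by rw [hs_eq]; rfl⟩)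
              rcases hq : pparts [] xs with _ | ⟨q, qs⟩
              · exact absurd hq (pparts_ne_nil xs [])
              · simp [pvAPP, PySem.List.slice_to_neg_one, List.dropLast_cons_of_ne_nil, hpnotmod]
          · -- single part: keycheck s on both sides
            rw [pparts_no_plus s [] hp]
            simp only [List.nil_append, pvAPP, List.length_cons, List.length_nil]
            rw [if_pos (by simp)]
            rw [show (PySem.List.pyGetD [s] 0 []) = s from rfl]
            rcases s with _ | ⟨c, cs⟩
            · simp [pvKeycheck, pvBFin, pvKeySet, pvFuncList]
            · rcases cs with _ | ⟨c2, cs2⟩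
              · -- single character
                have hkey : (decide ([c] ∈ pvKeySet)) = PySem.Chars.isIn [c] "abcdefghijklmnopqrstuvwxyz0123456789".toList := by
                  rcases hin : PySem.Chars.isIn [c] "abcdefghijklmnopqrstuvwxyz0123456789".toList with _ | _
                  · have hninf := (PySem.Chars.isIn_eq_false_iff _ _).mp hin
                    simp only [decide_eq_false_iff_not]
                    intro hmem
                    rw [pvKeySet, PySem.Set.mem_ofList] at hmem
                    obtain ⟨d, hd, hde⟩ := List.mem_map.mp hmem
                    have hdc : d = c := by simpa using hde
                    subst hdc
                    exact hninf ((List.singleton_infix_iff d _).mpr hd)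
                  · have := (PySem.Chars.isIn_iff_infix _ _).mp hin
                    have hc : c ∈ "abcdefghijklmnopqrstuvwxyz0123456789".toList :=
                      (List.singleton_infix_iff c _).mp this
                    simp only [decide_eq_true_iff]
                    rw [pvKeySet, PySem.Set.mem_ofList]
                    exact List.mem_map.mpr ⟨c, hc, rfl⟩
                have hfun : (decide ([c] ∈ PySem.Set.ofList pvFuncList)) = false := by
                  simp [PySem.Set.mem_ofList, pvFuncList]
                simp only [pvKeycheck, pvBFin, hkey, hfun, Bool.or_false]
                rw [if_pos (by simp)]
              · -- length ≥ 2
                have hkey : (decide ((c :: c2 :: cs2) ∈ pvKeySet)) = false := by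
                  simp only [decide_eq_false_iff_not]
                  intro hmem
                  rw [pvKeySet, PySem.Set.mem_ofList] at hmem
                  obtain ⟨d, _, hde⟩ := List.mem_map.mp hmem
                  simp at hde
                simp only [pvKeycheck, pvBFin, hkey, Bool.false_or]
                rw [if_neg (by simp)]
                simp [PySem.Set.mem_ofList]

theorem is_valid_hotkey_spec : Claim_equal_is_valid_hotkey := by
  intro hotkey _
  unfold Spec_is_valid_hotkey
  rw [A_eq, B_eq]
  exact main_core _ _ (le_refl _)
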